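-- pv_equiv track=rewrite | github.com/stdiorion/competitive-programming | contests_atcoder/abc158/abc158_d_check.py | solve
-- ===== SOURCE A (Python) =====
-- from collections import deque
--
-- def solve(s, Q, queries):
--     ans = deque()
--     ans.append(s)
--
--     reverse = 0
--
--     for q in queries:
--         if q[0] == "1":
--             reverse ^= 1
--         else:
--             if (q[1] == "2") ^ reverse:
--                 ans.append(q[2])
--             else:
--                 ans.appendleft(q[2])
--
--     if reverse:
--         ans = reversed(ans)
--
--     return "".join(ans)
-- ===== SOURCE B (Python) =====
-- def solve(s, Q, queries):
--     # Single backward pass: p is the parity of reversals that will still happen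
--     # after the current query, which decides each piece's side in the FINAL string.
--     front, back = [], []
--     p = 0
--     for q in reversed(queries):
--         if q[0] == "1":
--             p ^= 1
--         elif (q[1] == "2") != (p == 1):
--             back.append(q[2])
--         else:
--             front.append(q[2])
--     return "".join(front + [s] + back[::-1])
-- ===== Notes on version B (the rewrite author's own statement) =====
-- stated objective: alternative
-- what changed: B never simulates the deque or the lazy flag: one backward pass computes, for each appended piece, the parity of reversals still to come, which directly decides its side in the final string; the answer is assembled once as front + [s] + reversed(back).
import Mathlib
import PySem

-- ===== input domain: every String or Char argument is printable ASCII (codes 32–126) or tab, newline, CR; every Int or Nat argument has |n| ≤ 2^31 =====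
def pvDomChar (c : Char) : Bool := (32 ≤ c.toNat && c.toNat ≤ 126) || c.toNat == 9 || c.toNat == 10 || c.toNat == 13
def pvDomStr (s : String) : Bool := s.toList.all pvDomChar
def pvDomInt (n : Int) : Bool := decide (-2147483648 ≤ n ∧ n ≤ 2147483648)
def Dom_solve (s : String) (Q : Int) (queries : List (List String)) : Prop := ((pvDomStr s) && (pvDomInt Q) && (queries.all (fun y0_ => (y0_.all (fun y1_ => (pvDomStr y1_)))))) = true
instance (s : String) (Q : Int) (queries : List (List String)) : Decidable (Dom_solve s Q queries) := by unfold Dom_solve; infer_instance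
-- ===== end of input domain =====

-- B replaces A's deque simulation with a lazy reverse flag by a single BACKWARD pass:
-- the parity of reversals still to come decides each piece's side in the final string directly.

-- ===== PORT A =====
-- one loop iteration: state = (ans deque as a list, reverse flag 0/1)
def solveStepA (st : List String × Nat) (q : List String) : List String × Nat :=
  if (PySem.List.pyGet? q 0).getD "" = "1" then
    (st.1, st.2 ^^^ 1)
  else
    if ((if (PySem.List.pyGet? q 1).getD "" = "2" then 1 else 0) ^^^ st.2) ≠ 0 then
      (st.1 ++ [(PySem.List.pyGet? q 2).getD ""], st.2)      -- ans.append(q[2])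
    else
      ((PySem.List.pyGet? q 2).getD "" :: st.1, st.2)        -- ans.appendleft(q[2])

def solve (s : String) (Q : Int) (queries : List (List String)) : String :=
  let st := queries.foldl solveStepA ([s], 0)
  let ans := if st.2 ≠ 0 then st.1.reverse else st.1         -- if reverse: ans = reversed(ans)
  PySem.Str.join "" ans

-- ===== PORT B =====
-- one iteration of B's backward loop: state = (front, back, p)
def solveStepB (st : List String × List String × Nat) (q : List String) :
    List String × List String × Nat :=
  if (PySem.List.pyGet? q 0).getD "" = "1" then
    (st.1, st.2.1, st.2.2 ^^^ 1)                             -- p ^= 1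
  else if (decide ((PySem.List.pyGet? q 1).getD "" = "2") != decide (st.2.2 = 1)) then
    (st.1, st.2.1 ++ [(PySem.List.pyGet? q 2).getD ""], st.2.2)   -- back.append(q[2])
  else
    (st.1 ++ [(PySem.List.pyGet? q 2).getD ""], st.2.1, st.2.2)   -- front.append(q[2])

def solve_alt (s : String) (Q : Int) (queries : List (List String)) : String :=
  let st := queries.reverse.foldl solveStepB ([], [], 0)     -- for q in reversed(queries)
  PySem.Str.join "" (st.1 ++ [s] ++ st.2.1.reverse)          -- "".join(front + [s] + back[::-1])

-- ===== PRECONDITION & SPEC =====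
-- Pre_ excludes exactly the inputs where Python A raises IndexError: an empty query, or a
-- non-'1' query with fewer than 3 fields (A reads q[1] and q[2] there).  B raises there too.
def Pre_solve (s : String) (Q : Int) (queries : List (List String)) : Prop :=
  ∀ q ∈ queries, 1 ≤ q.length ∧ (q.headD "" ≠ "1" → 3 ≤ q.length)
instance (s : String) (Q : Int) (queries : List (List String)) : Decidable (Pre_solve s Q queries) := by unfold Pre_solve; infer_instance
def pvWitness_solve : String × Int × List (List String) := ("ab", 3, [["1"], ["2", "2", "cd"], ["2", "1", "e"]])
def Spec_solve (s : String) (Q : Int) (queries : List (List String)) (out : String) : Prop := out = solve_alt s Q queries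
instance (s : String) (Q : Int) (queries : List (List String)) (out : String) : Decidable (Spec_solve s Q queries out) := by unfold Spec_solve; infer_instance

-- ===== CLAIM (what is proved, stated in full; the proofs are below) =====
def Claim_equal_solve : Prop := ∀ (s : String) (Q : Int) (queries : List (List String)), Dom_solve s Q queries → Pre_solve s Q queries → Spec_solve s Q queries (solve s Q queries)

-- ===== LEMMAS AND PROOFS =====

-- Key invariant: A's deque read in its final orientation is B's front, then the start
-- segment (reversed iff the initial flag differs from B's suffix parity), then B's back
-- reversed.  (Holds for all queries; Pre_ plays no role in the value equality.)
-- B's parity accumulator stays a bit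
theorem pbit (qs : List (List String)) :
    ∀ st : List String × List String × Nat, st.2.2 = 0 ∨ st.2.2 = 1 →
      (qs.foldl solveStepB st).2.2 = 0 ∨ (qs.foldl solveStepB st).2.2 = 1 := by
  induction qs with
  | nil => intro st h; simpa using h
  | cons q qs ih =>
    intro st h
    rw [List.foldl_cons]
    apply ih
    rcases h with h | h <;> unfold solveStepB <;> split_ifs <;> simp [h]

theorem key (qs : List (List String)) :
    ∀ (ans : List String) (r : Nat), r = 0 ∨ r = 1 →
      (if (qs.foldl solveStepA (ans, r)).2 ≠ 0
         then (qs.foldl solveStepA (ans, r)).1.reverse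
         else (qs.foldl solveStepA (ans, r)).1)
      = (qs.reverse.foldl solveStepB ([], [], 0)).1
        ++ (if r ^^^ (qs.reverse.foldl solveStepB ([], [], 0)).2.2 ≠ 0
              then ans.reverse else ans)
        ++ (qs.reverse.foldl solveStepB ([], [], 0)).2.1.reverse := by
  induction qs with
  | nil => intro ans r hr; rcases hr with h | h <;> simp [h]
  | cons q qs ih =>
    intro ans r hr
    rw [List.foldl_cons, List.reverse_cons, List.foldl_append]
    have hp := pbit qs.reverse ([], [], 0) (Or.inl rfl)
    generalize hg : List.foldl solveStepB ([], [], 0) qs.reverse = g at hp ih ⊢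
    obtain ⟨f, b, p⟩ := g
    dsimp only at hp ih ⊢
    rw [List.foldl_cons, List.foldl_nil]
    by_cases h0 : (PySem.List.pyGet? q 0).getD "" = "1"
    · have hA : solveStepA (ans, r) q = (ans, r ^^^ 1) := by simp [solveStepA, h0]
      rw [hA, ih ans (r ^^^ 1) (by rcases hr with h | h <;> simp [h])]
      rcases hr with h | h <;> rcases hp with hp | hp <;>
        simp [solveStepB, h0, h, hp]
    · by_cases h1 : (PySem.List.pyGet? q 1).getD "" = "2" <;>
        rcases hr with h | h <;> rcases hp with hp | hp <;>
        · first
          | (have hA : solveStepA (ans, r) q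
                = (ans ++ [(PySem.List.pyGet? q 2).getD ""], r) := by
              simp [solveStepA, h0, h1, h]
             rw [hA, ih _ r (by simp [h])]
             simp [solveStepB, h0, h1, h, hp])
          | (have hA : solveStepA (ans, r) q
                = ((PySem.List.pyGet? q 2).getD "" :: ans, r) := by
              simp [solveStepA, h0, h1, h]
             rw [hA, ih _ r (by simp [h])]
             simp [solveStepB, h0, h1, h, hp])

-- ===== VERDICT (by name: the statement is the Claim_ definition above) =====
theorem solve_spec : Claim_equal_solve := by
  intro s Q queries _ _
  unfold Spec_solve solve solve_alt
  have h := key queries [s] 0 (Or.inl rfl)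
  simp at h
  simp [h]
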